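-- pv_equiv track=rewrite | github.com/pypi-data/pypi-mirror-384 | packages/jmo-security/jmo_security-0.6.0.tar.gz/jmo_security-0.6.0/scripts/cli/jmo.py | fail_code
-- ===== SOURCE A (Python) =====
-- SEV_ORDER = ["CRITICAL", "HIGH", "MEDIUM", "LOW", "INFO"]
--
-- def fail_code(threshold: str | None, counts: dict) -> int:
--     if not threshold:
--         return 0
--     thr = threshold.upper()
--     if thr not in SEV_ORDER:
--         return 0
--     idx = SEV_ORDER.index(thr)
--     severities = SEV_ORDER[: idx + 1]
--     return 1 if any(counts.get(s, 0) > 0 for s in severities) else 0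
-- ===== SOURCE B (Python) =====
-- SEV_ORDER = ["CRITICAL", "HIGH", "MEDIUM", "LOW", "INFO"]
-- RANK = {s: i for i, s in enumerate(SEV_ORDER)}
--
-- def fail_code(threshold: str | None, counts: dict) -> int:
--     if not threshold:
--         return 0
--     thr = threshold.upper()
--     if thr not in RANK:
--         return 0
--     ti = RANK[thr]
--     return 1 if any(RANK.get(k, 99) <= ti and v > 0 for k, v in counts.items()) else 0
-- ===== Notes on version B (the rewrite author's own statement) =====
-- stated objective: idiomatic
-- what changed: B precomputes a severity->rank dict and makes one pass over counts.items() checking each key's rank against the threshold rank, instead of slicing SEV_ORDER and calling counts.get once per severity.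
import Mathlib
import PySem

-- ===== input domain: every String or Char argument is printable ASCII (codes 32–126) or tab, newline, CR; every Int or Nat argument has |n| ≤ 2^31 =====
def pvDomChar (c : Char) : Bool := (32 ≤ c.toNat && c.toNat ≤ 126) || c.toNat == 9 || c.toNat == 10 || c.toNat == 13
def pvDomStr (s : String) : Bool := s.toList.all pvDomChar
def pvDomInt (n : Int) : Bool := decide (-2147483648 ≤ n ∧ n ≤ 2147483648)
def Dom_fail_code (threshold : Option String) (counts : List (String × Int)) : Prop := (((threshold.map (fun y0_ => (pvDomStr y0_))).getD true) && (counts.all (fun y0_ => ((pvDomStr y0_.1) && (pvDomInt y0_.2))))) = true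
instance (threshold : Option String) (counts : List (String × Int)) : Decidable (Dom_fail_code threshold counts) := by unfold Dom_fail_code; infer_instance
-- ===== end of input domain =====

-- B replaces A's SEV_ORDER slice + per-severity counts.get with a precomputed rank dict and
-- one pass over counts.items() (objective: idiomatic; return value only, no side effects).

-- ===== PORT A =====
def SEV_ORDER : List String := ["CRITICAL", "HIGH", "MEDIUM", "LOW", "INFO"]

def fail_code (threshold : Option String) (counts : List (String × Int)) : Int :=
  match threshold with
  | none => 0
  | some t =>
    if t = "" then 0
    else
      let thr := PySem.Str.upper t
      if thr ∉ SEV_ORDER then 0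
      else
        match PySem.List.index? SEV_ORDER thr with
        | none => 0  -- unreachable: thr ∈ SEV_ORDER
        | some idx =>
          let severities := PySem.List.slice SEV_ORDER none (some ((idx : Int) + 1))
          if severities.any (fun s => (PySem.Dict.mk counts).getD s 0 > 0) then 1 else 0

-- ===== PORT B =====
-- RANK = {s: i for i, s in enumerate(SEV_ORDER)}
def RANK : PySem.Dict String Int :=
  (PySem.List.enumerate SEV_ORDER 0).foldl (fun d p => d.insert p.2 p.1) (PySem.Dict.mk [])

def fail_code_alt (threshold : Option String) (counts : List (String × Int)) : Int :=
  match threshold with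
  | none => 0
  | some t =>
    if t = "" then 0
    else
      let thr := PySem.Str.upper t
      match RANK.get? thr with
      | none => 0  -- 'if thr not in RANK: return 0', else ti = RANK[thr]
      | some ti =>
        if counts.any (fun kv => RANK.getD kv.1 99 ≤ ti && kv.2 > 0) then 1 else 0

-- ===== PRECONDITION & SPEC =====
-- Pre_ requires the keys of counts to be distinct, which every real Python dict guarantees; on the
-- association-list model with a duplicated key, A's first-match .get versus B's iteration over all
-- items is an artefact of the encoding, not of either program.
def Pre_fail_code (threshold : Option String) (counts : List (String × Int)) : Prop :=
  (counts.map Prod.fst).Nodup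
instance (threshold : Option String) (counts : List (String × Int)) : Decidable (Pre_fail_code threshold counts) := by unfold Pre_fail_code; infer_instance

def pvWitness_fail_code : Option String × (List (String × Int)) := (some "high", [("HIGH", 2), ("LOW", 0)])

def Spec_fail_code (threshold : Option String) (counts : List (String × Int)) (out : Int) : Prop := out = fail_code_alt threshold counts
instance (threshold : Option String) (counts : List (String × Int)) (out : Int) : Decidable (Spec_fail_code threshold counts out) := by unfold Spec_fail_code; infer_instance

-- ===== CLAIM (what is proved, stated in full; the proofs are below) =====
def Claim_equal_fail_code : Prop := ∀ (threshold : Option String) (counts : List (String × Int)), Dom_fail_code threshold counts → Pre_fail_code threshold counts → Spec_fail_code threshold counts (fail_code threshold counts)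

-- ===== LEMMAS AND PROOFS =====

lemma rank_eq : RANK = PySem.Dict.mk [("CRITICAL", 0), ("HIGH", 1), ("MEDIUM", 2), ("LOW", 3), ("INFO", 4)] := by
  decide

-- the key any-over-severities ↔ any-over-items equivalence, for Nodup keys
lemma any_getD_eq (counts : List (String × Int)) (h : (counts.map Prod.fst).Nodup)
    (p : String → Bool) (sevs : List String) (hp : ∀ k, p k = sevs.contains k) :
    sevs.any (fun s => decide ((PySem.Dict.mk counts).getD s 0 > 0))
      = counts.any (fun kv => p kv.1 && decide (kv.2 > 0)) := by
  have hk : (PySem.Dict.mk counts).keys.Nodup := h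
  rw [Bool.eq_iff_iff]
  simp only [List.any_eq_true, decide_eq_true_eq, Bool.and_eq_true, hp, List.contains_iff_mem]
  constructor
  · rintro ⟨s, hs, hpos⟩
    rcases hget : (PySem.Dict.mk counts).get? s with _ | v
    · rw [PySem.Dict.getD_eq_get?_getD, hget] at hpos; simp at hpos
    · have hv : (s, v) ∈ counts := PySem.Dict.mem_items_of_get?_eq_some _ hget
      refine ⟨(s, v), hv, hs, ?_⟩
      rw [PySem.Dict.getD_eq_get?_getD, hget] at hpos; simpa using hpos
  · rintro ⟨⟨k, v⟩, hkv, hks, hpos⟩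
    exact ⟨k, hks, by rw [PySem.Dict.getD_of_mem_items _ hkv hk]; exact hpos⟩

lemma rank_getD_case (sevs : List String) (ti : Int)
    (h : ∀ k ∈ SEV_ORDER, decide (RANK.getD k 99 ≤ ti) = sevs.contains k)
    (h99 : decide ((99 : Int) ≤ ti) = false) (hs : ∀ s ∈ sevs, s ∈ SEV_ORDER) :
    ∀ k, decide (RANK.getD k 99 ≤ ti) = sevs.contains k := by
  intro k
  by_cases h1 : k = "CRITICAL"; · exact h k (by rw [h1]; decide)
  by_cases h2 : k = "HIGH"; · exact h k (by rw [h2]; decide)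
  by_cases h3 : k = "MEDIUM"; · exact h k (by rw [h3]; decide)
  by_cases h4 : k = "LOW"; · exact h k (by rw [h4]; decide)
  by_cases h5 : k = "INFO"; · exact h k (by rw [h5]; decide)
  have hget : RANK.getD k 99 = 99 := by
    rw [rank_eq]
    simp [PySem.Dict.getD_eq_get?_getD,
      Ne.symm h1, Ne.symm h2, Ne.symm h3, Ne.symm h4, Ne.symm h5, PySem.Dict.get?]
  rw [hget, h99]
  symm
  rw [Bool.eq_false_iff]
  intro hc
  have hk := hs k (by simpa using hc)
  simp [SEV_ORDER] at hk
  tauto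

lemma case_core (counts : List (String × Int)) (h : (counts.map Prod.fst).Nodup)
    (sevs : List String) (ti : Int)
    (hp : ∀ k, decide (RANK.getD k 99 ≤ ti) = sevs.contains k) :
    (if sevs.any (fun s => decide ((PySem.Dict.mk counts).getD s 0 > 0)) then (1 : Int) else 0)
      = if counts.any (fun kv => decide (RANK.getD kv.1 99 ≤ ti) && decide (kv.2 > 0)) then 1 else 0 := by
  rw [any_getD_eq counts h _ sevs hp]

theorem fail_code_spec : Claim_equal_fail_code := by
  intro threshold counts _ hpre
  unfold Spec_fail_code fail_code fail_code_alt
  match threshold with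
  | none => rfl
  | some t =>
    by_cases ht : t = ""
    · simp [ht]
    · simp only [if_neg ht]
      by_cases hmem : PySem.Str.upper t ∈ SEV_ORDER
      · have hcases : PySem.Str.upper t = "CRITICAL" ∨ PySem.Str.upper t = "HIGH" ∨
            PySem.Str.upper t = "MEDIUM" ∨ PySem.Str.upper t = "LOW" ∨
            PySem.Str.upper t = "INFO" := by simpa [SEV_ORDER] using hmem
        rcases hcases with h | h | h | h | h <;> rw [h] <;> clear h hmem <;>
        [ (simp only [if_neg (show ¬ ("CRITICAL" : String) ∉ SEV_ORDER by decide),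
             show PySem.List.index? SEV_ORDER "CRITICAL" = some 0 from by decide,
             show RANK.get? "CRITICAL" = some 0 from by decide,
             show PySem.List.slice SEV_ORDER none (some (((0 : Nat) : Int) + 1)) = ["CRITICAL"] from by decide];
           exact case_core counts hpre ["CRITICAL"] 0 (rank_getD_case _ _ (by decide) (by decide) (by decide)));
          (simp only [if_neg (show ¬ ("HIGH" : String) ∉ SEV_ORDER by decide),
             show PySem.List.index? SEV_ORDER "HIGH" = some 1 from by decide,
             show RANK.get? "HIGH" = some 1 from by decide,
             show PySem.List.slice SEV_ORDER none (some (((1 : Nat) : Int) + 1)) = ["CRITICAL", "HIGH"] from by decide];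
           exact case_core counts hpre ["CRITICAL", "HIGH"] 1 (rank_getD_case _ _ (by decide) (by decide) (by decide)));
          (simp only [if_neg (show ¬ ("MEDIUM" : String) ∉ SEV_ORDER by decide),
             show PySem.List.index? SEV_ORDER "MEDIUM" = some 2 from by decide,
             show RANK.get? "MEDIUM" = some 2 from by decide,
             show PySem.List.slice SEV_ORDER none (some (((2 : Nat) : Int) + 1)) = ["CRITICAL", "HIGH", "MEDIUM"] from by decide];
           exact case_core counts hpre ["CRITICAL", "HIGH", "MEDIUM"] 2 (rank_getD_case _ _ (by decide) (by decide) (by decide)));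
          (simp only [if_neg (show ¬ ("LOW" : String) ∉ SEV_ORDER by decide),
             show PySem.List.index? SEV_ORDER "LOW" = some 3 from by decide,
             show RANK.get? "LOW" = some 3 from by decide,
             show PySem.List.slice SEV_ORDER none (some (((3 : Nat) : Int) + 1)) = ["CRITICAL", "HIGH", "MEDIUM", "LOW"] from by decide];
           exact case_core counts hpre ["CRITICAL", "HIGH", "MEDIUM", "LOW"] 3 (rank_getD_case _ _ (by decide) (by decide) (by decide)));
          (simp only [if_neg (show ¬ ("INFO" : String) ∉ SEV_ORDER by decide),
             show PySem.List.index? SEV_ORDER "INFO" = some 4 from by decide,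
             show RANK.get? "INFO" = some 4 from by decide,
             show PySem.List.slice SEV_ORDER none (some (((4 : Nat) : Int) + 1)) = SEV_ORDER from by decide];
           exact case_core counts hpre SEV_ORDER 4 (rank_getD_case _ _ (by decide) (by decide) (by decide)))]
      · have hnone : RANK.get? (PySem.Str.upper t) = none := by
          rw [rank_eq]
          simp only [SEV_ORDER, List.mem_cons, List.not_mem_nil, or_false, not_or] at hmem
          obtain ⟨h1, h2, h3, h4, h5⟩ := hmem
          simp [Ne.symm h1, Ne.symm h2, Ne.symm h3, Ne.symm h4, Ne.symm h5, PySem.Dict.get?]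
        simp [hmem, hnone]
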